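-- pv_equiv track=rewrite | github.com/bradosia/Validating-Protein-Structure-Models | CRD_File_py_src/EnergyScoreMethods.py | atomSubMap
-- ===== SOURCE A (Python) =====
-- def atomSubMap(atomMap, startIndex, endIndex):
--     subMap = {}
--     i=0
--     for j in range(startIndex, endIndex):
--         if j in atomMap:
--             subMap[i] = atomMap[j]
--         i+=1
--     return subMap
-- ===== SOURCE B (Python) =====
-- def atomSubMap(atomMap, startIndex, endIndex):
--     return {k - startIndex: atomMap[k]
--             for k in sorted(atomMap)
--             if startIndex <= k < endIndex}
-- ===== Notes on version B (the rewrite author's own statement) =====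
-- stated objective: alternative
-- what changed: B iterates over the sorted keys of atomMap restricted to [startIndex, endIndex) instead of scanning every integer j in range(startIndex, endIndex) and probing the dict for each; cost moves from the range length to the dict size.
import Mathlib
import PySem

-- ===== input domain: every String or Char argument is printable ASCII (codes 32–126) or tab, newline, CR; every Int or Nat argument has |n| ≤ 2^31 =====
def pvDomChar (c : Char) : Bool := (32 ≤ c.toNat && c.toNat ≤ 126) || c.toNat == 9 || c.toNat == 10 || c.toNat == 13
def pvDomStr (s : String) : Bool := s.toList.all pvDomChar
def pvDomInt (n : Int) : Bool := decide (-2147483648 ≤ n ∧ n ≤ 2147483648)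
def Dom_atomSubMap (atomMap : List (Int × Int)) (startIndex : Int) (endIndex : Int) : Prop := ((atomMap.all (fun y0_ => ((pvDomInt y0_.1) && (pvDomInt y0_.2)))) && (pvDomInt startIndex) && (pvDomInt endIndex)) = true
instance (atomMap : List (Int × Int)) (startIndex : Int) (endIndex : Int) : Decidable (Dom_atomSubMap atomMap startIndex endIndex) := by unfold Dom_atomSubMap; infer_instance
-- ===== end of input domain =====

-- B replaces A's scan over every index of range(startIndex, endIndex) by a scan over the
-- sorted keys of atomMap restricted to the range (objective: alternative — cost depends on
-- the dict size instead of the range length).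

-- ===== PORT A =====
-- for j in range(startIndex, endIndex): if j in atomMap: subMap[i] = atomMap[j]; i += 1
def atomSubMap (atomMap : List (Int × Int)) (startIndex : Int) (endIndex : Int) : List (Int × Int) :=
  let d := PySem.Dict.ofList atomMap
  let res := (PySem.List.pyRange startIndex endIndex 1).foldl
    (fun (st : PySem.Dict Int Int × Int) j =>
      ((if d.contains j then st.1.insert st.2 (d.getD j 0) else st.1), st.2 + 1))
    (PySem.Dict.empty, 0)
  res.1.items

-- ===== PORT B =====
-- {k - startIndex: atomMap[k] for k in sorted(atomMap) if startIndex <= k < endIndex}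
-- (the comprehension's keys k - startIndex are distinct, so the dict's items are exactly
--  this list; atomMap[k] for a key k of the dict is d.getD k 0)
def atomSubMap_alt (atomMap : List (Int × Int)) (startIndex : Int) (endIndex : Int) : List (Int × Int) :=
  let d := PySem.Dict.ofList atomMap
  ((PySem.List.sorted d.keys (fun k => k) false).filter
      (fun k => decide (startIndex ≤ k) && decide (k < endIndex))).map
    (fun k => (k - startIndex, d.getD k 0))

-- ===== PRECONDITION & SPEC =====
def Spec_atomSubMap (atomMap : List (Int × Int)) (startIndex : Int) (endIndex : Int) (out : List (Int × Int)) : Prop := out = atomSubMap_alt atomMap startIndex endIndex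
instance (atomMap : List (Int × Int)) (startIndex : Int) (endIndex : Int) (out : List (Int × Int)) : Decidable (Spec_atomSubMap atomMap startIndex endIndex out) := by unfold Spec_atomSubMap; infer_instance

-- ===== CLAIM (what is proved, stated in full; the proofs are below) =====
def Claim_equal_atomSubMap : Prop := ∀ (atomMap : List (Int × Int)) (startIndex : Int) (endIndex : Int), Dom_atomSubMap atomMap startIndex endIndex → Spec_atomSubMap atomMap startIndex endIndex (atomSubMap atomMap startIndex endIndex)

-- ===== LEMMAS AND PROOFS =====

-- two strictly increasing Int lists with the same members are equal
lemma eq_of_pairwise_lt_of_mem_iff (l₁ l₂ : List Int)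
    (h1 : l₁.Pairwise (· < ·)) (h2 : l₂.Pairwise (· < ·))
    (h : ∀ x, x ∈ l₁ ↔ x ∈ l₂) : l₁ = l₂ := by
  have hp : l₁.Perm l₂ := by
    refine List.perm_of_nodup_nodup_toFinset_eq (h1.nodup) (h2.nodup) ?_
    ext x; simp [h x]
  exact hp.eq_of_pairwise (fun a b _ _ h h' => le_antisymm h h')
    (h1.imp le_of_lt) (h2.imp le_of_lt)

-- A's loop, characterised: for each j of the range in order it appends (i0 + (j - a), v)
-- whenever d.get? j = some v
lemma loopA_aux (d : PySem.Dict Int Int) (b : Int) :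
    ∀ (n : Nat) (a : Int), (b - a).toNat = n →
    ∀ (s : PySem.Dict Int Int) (i0 : Int), (∀ k ∈ s.keys, k < i0) →
    (((PySem.List.pyRange a b 1).foldl
        (fun (st : PySem.Dict Int Int × Int) j =>
          ((if d.contains j then st.1.insert st.2 (d.getD j 0) else st.1), st.2 + 1))
        (s, i0)).1).items
      = s.items ++ (PySem.List.pyRange a b 1).filterMap
          (fun j => (d.get? j).map (fun v => (i0 + (j - a), v))) := by
  intro n
  induction n with
  | zero =>
    intro a ha s i0 _
    rw [PySem.List.pyRange_one_eq_nil (by omega)]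
    simp
  | succ n ih =>
    intro a ha s i0 hinv
    have hab : a < b := by omega
    rw [PySem.List.pyRange_one_cons hab]
    simp only [List.foldl_cons, List.filterMap_cons]
    have hfun : (fun j => (d.get? j).map (fun v => ((i0 + 1) + (j - (a + 1)), v)))
        = (fun j => (d.get? j).map (fun v => (i0 + (j - a), v))) := by
      funext j; congr 1; funext v; congr 1; ring
    have hni0 : s.contains i0 = false := by
      rw [PySem.Dict.contains_eq_decide_mem_keys]
      simpa using fun hmem => absurd (hinv i0 hmem) (lt_irrefl i0)
    by_cases hc : d.contains a = true
    · have hs : (d.get? a).isSome := by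
        rw [← PySem.Dict.contains_eq_isSome_get?]; exact hc
      obtain ⟨v, hv⟩ := Option.isSome_iff_exists.mp hs
      have hinv' : ∀ k ∈ (s.insert i0 (d.getD a 0)).keys, k < i0 + 1 := by
        intro k hk
        rcases (PySem.Dict.mem_keys_insert s i0 k _).mp hk with h | h
        · omega
        · exact lt_trans (hinv k h) (by omega)
      rw [hc, if_pos rfl, ih (a + 1) (by omega) _ (i0 + 1) hinv', hfun,
        PySem.Dict.items_insert_of_not_contains s _ hni0, hv,
        PySem.Dict.getD_of_get?_eq_some _ _ hv]
      simp
    · have hg : d.get? a = none := by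
        rw [PySem.Dict.get?_eq_none_iff_contains]
        exact eq_false_of_ne_true hc
      have hinv' : ∀ k ∈ s.keys, k < i0 + 1 := fun k hk => lt_trans (hinv k hk) (by omega)
      rw [eq_false_of_ne_true hc, if_neg (by simp), ih (a + 1) (by omega) s (i0 + 1) hinv',
        hfun, hg]
      simp

-- filterMap through get? is map over the contained keys
lemma filterMap_get_eq (d : PySem.Dict Int Int) (s : Int) (l : List Int) :
    l.filterMap (fun j => (d.get? j).map (fun v => (0 + (j - s), v)))
      = (l.filter (fun j => d.contains j)).map (fun j => (j - s, d.getD j 0)) := by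
  simp only [zero_add]
  induction l with
  | nil => rfl
  | cons x t ih =>
    rw [List.filterMap_cons, List.filter_cons]
    by_cases hc : d.contains x = true
    · have hs : (d.get? x).isSome := by
        rw [← PySem.Dict.contains_eq_isSome_get?]; exact hc
      obtain ⟨v, hv⟩ := Option.isSome_iff_exists.mp hs
      simp only [hv, Option.map_some, hc, if_true, List.map_cons,
        PySem.Dict.getD_of_get?_eq_some _ _ hv, ih]
    · have hg : d.get? x = none := by
        rw [PySem.Dict.get?_eq_none_iff_contains]; exact eq_false_of_ne_true hc
      simp only [hg, Option.map_none, eq_false_of_ne_true hc, Bool.false_eq_true,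
        if_false, ih]

-- the two key lists agree: range indices that are keys = sorted keys inside the range
lemma keys_lists_eq (atomMap : List (Int × Int)) (s e : Int) :
    (PySem.List.pyRange s e 1).filter (fun j => (PySem.Dict.ofList atomMap).contains j)
      = (PySem.List.sorted (PySem.Dict.ofList atomMap).keys (fun k => k) false).filter
          (fun k => decide (s ≤ k) && decide (k < e)) := by
  apply eq_of_pairwise_lt_of_mem_iff
  · exact (PySem.List.pairwise_lt_pyRange_one s e).filter _
  · have hnd : ((PySem.List.sorted (PySem.Dict.ofList atomMap).keys (fun k => k) false)).Nodup :=
      (PySem.List.sorted_perm _ _ _).nodup_iff.mpr (PySem.Dict.nodup_keys_ofList atomMap)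
    have hle := PySem.List.sorted_pairwise (PySem.Dict.ofList atomMap).keys (fun k => k)
    exact ((hle.and hnd).imp (fun h => lt_of_le_of_ne h.1 h.2)).filter _
  · intro x
    simp only [List.mem_filter, PySem.List.mem_pyRange_one, PySem.List.mem_sorted,
      ← PySem.Dict.contains_iff_mem_keys, Bool.and_eq_true, decide_eq_true_eq]
    tauto

-- ===== VERDICT (by name: the statement is the Claim_ definition above) =====
theorem atomSubMap_spec : Claim_equal_atomSubMap := by
  intro atomMap startIndex endIndex _
  unfold Spec_atomSubMap atomSubMap atomSubMap_alt
  rw [loopA_aux (PySem.Dict.ofList atomMap) endIndex ((endIndex - startIndex).toNat)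
        startIndex rfl PySem.Dict.empty 0 (by simp [PySem.Dict.keys_empty]),
      filterMap_get_eq, keys_lists_eq]
  rfl
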